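-- pv_equiv track=rewrite | github.com/mutalip/interviewbit-coding-ninja | 03String/PrettyJson.py | prettyJSON
-- ===== SOURCE A (Python) =====
-- def prettyJSON(A):
--     indent = 0
--     res = []
--     line = ''
--     for x in A:
--         if x in '{[':
--             if line:
--                 res.append(line)
--             res.append('\t' * indent + x)
--             line = ''
--             indent += 1
--         elif x in ']}':
--             if line:
--                 res.append(line)
--             indent -= 1
--             line = '\t' * indent + x  # Might be followed by ','
--         else:
--             if not line:
--                 line = '\t' * indent
--             line += x
--             if x == ",":
--                 res.append(line)
--                 line = ''
--     if line:
--         res.append(line)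
--     return res
-- ===== SOURCE B (Python) =====
-- def prettyJSON(A):
--     # Two-pass: tokenize into brackets and maximal comma-terminated content runs,
--     # then emit lines per token with an Optional pending line.
--     tokens = []
--     cur = ''
--     for x in A:
--         if x in '{[]}':
--             if cur:
--                 tokens.append(cur)
--                 cur = ''
--             tokens.append(x)
--         elif x == ',':
--             tokens.append(cur + x)
--             cur = ''
--         else:
--             cur += x
--     if cur:
--         tokens.append(cur)
--
--     out = []
--     pending = None
--     depth = 0
--     for t in tokens:
--         if t == '{' or t == '[':
--             if pending is not None:
--                 out.append(pending)
--             out.append('\t' * depth + t)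
--             pending = None
--             depth += 1
--         elif t == '}' or t == ']':
--             if pending is not None:
--                 out.append(pending)
--             depth -= 1
--             pending = '\t' * depth + t
--         elif t.endswith(','):
--             out.append((pending if pending is not None else '\t' * depth) + t)
--             pending = None
--         else:
--             pending = (pending if pending is not None else '\t' * depth) + t
--     if pending is not None:
--         out.append(pending)
--     return out
-- ===== Notes on version B (the rewrite author's own statement) =====
-- stated objective: alternative
-- what changed: Replaces A's single per-character state machine by a two-pass design: a tokenizer producing brackets and maximal comma-terminated content runs, then a per-token emitter keeping an Optional pending line that appends whole runs at once and flushes comma-runs directly.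
import Mathlib
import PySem

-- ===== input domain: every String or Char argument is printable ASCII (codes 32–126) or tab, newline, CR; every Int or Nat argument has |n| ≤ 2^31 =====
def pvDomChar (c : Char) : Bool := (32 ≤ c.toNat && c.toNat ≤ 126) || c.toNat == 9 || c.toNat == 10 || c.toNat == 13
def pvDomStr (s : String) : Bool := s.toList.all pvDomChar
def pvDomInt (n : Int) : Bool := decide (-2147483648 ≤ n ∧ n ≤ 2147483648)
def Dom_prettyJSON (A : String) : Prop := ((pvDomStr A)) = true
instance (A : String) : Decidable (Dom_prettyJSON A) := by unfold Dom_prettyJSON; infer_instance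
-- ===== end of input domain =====

-- B is an alternative decomposition (tokenize into brackets/runs, then an Option-pending emitter); equal output proved on the whole domain.

-- '\t' * n  (Python: empty for n ≤ 0)
def pvTabs (n : Int) : List Char := List.replicate n.toNat '\t'

-- ===== PORT A =====
-- A's per-character loop; state: (indent, res, line), text as List Char
def pvStepA (s : Int × List (List Char) × List Char) (x : Char) : Int × List (List Char) × List Char :=
  let (indent, res, line) := s
  if x = '{' ∨ x = '[' then
    (indent + 1, (if line = [] then res else res ++ [line]) ++ [pvTabs indent ++ [x]], [])
  else if x = ']' ∨ x = '}' then
    (indent - 1, (if line = [] then res else res ++ [line]), pvTabs (indent - 1) ++ [x])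
  else
    let line' := (if line = [] then pvTabs indent else line) ++ [x]
    if x = ',' then (indent, res ++ [line'], []) else (indent, res, line')

def prettyJSON (A : String) : List String :=
  let s := A.toList.foldl pvStepA (0, [], [])
  (if s.2.2 = [] then s.2.1 else s.2.1 ++ [s.2.2]).map (fun l => String.ofList l)

-- ===== PORT B =====
-- pass 1: tokens are single brackets or maximal non-bracket runs, runs cut after each comma
def pvTok (cs : List Char) (cur : List Char) : List (List Char) :=
  match cs with
  | [] => if cur = [] then [] else [cur]
  | x :: xs =>
    if x = '{' ∨ x = '[' ∨ x = ']' ∨ x = '}' then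
      (if cur = [] then [] else [cur]) ++ [x] :: pvTok xs []
    else if x = ',' then (cur ++ [x]) :: pvTok xs []
    else pvTok xs (cur ++ [x])

-- pass 2: per-token emitter; state: (depth, out, pending line as Option)
def pvStepB (s : Int × List (List Char) × Option (List Char)) (t : List Char) :
    Int × List (List Char) × Option (List Char) :=
  let (depth, out, pending) := s
  if t = ['{'] ∨ t = ['['] then
    (depth + 1, (match pending with | none => out | some p => out ++ [p]) ++ [pvTabs depth ++ t],
      none)
  else if t = ['}'] ∨ t = [']'] then
    (depth - 1, (match pending with | none => out | some p => out ++ [p]),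
      some (pvTabs (depth - 1) ++ t))
  else if t.getLast? = some ',' then
    (depth, out ++ [pending.getD (pvTabs depth) ++ t], none)
  else
    (depth, out, some (pending.getD (pvTabs depth) ++ t))

def prettyJSON_alt (A : String) : List String :=
  let s := (pvTok A.toList []).foldl pvStepB (0, [], none)
  (match s.2.2 with | none => s.2.1 | some p => s.2.1 ++ [p]).map (fun l => String.ofList l)

-- ===== PRECONDITION & SPEC =====
def Spec_prettyJSON (A : String) (out : List String) : Prop := out = prettyJSON_alt A
instance (A : String) (out : List String) : Decidable (Spec_prettyJSON A out) := by unfold Spec_prettyJSON; infer_instance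

-- ===== CLAIM (what is proved, stated in full; the proofs are below) =====
def Claim_equal_prettyJSON : Prop := ∀ (A : String), Dom_prettyJSON A → Spec_prettyJSON A (prettyJSON A)

-- ===== LEMMAS AND PROOFS =====

-- a "plain" run: no brackets, no commas
def pvPlain (c : List Char) : Prop :=
  ∀ x ∈ c, ¬(x = '{' ∨ x = '[' ∨ x = ']' ∨ x = '}') ∧ x ≠ ','

-- A-state → B-state: an empty line is "no pending line"
def pvConv (s : Int × List (List Char) × List Char) :
    Int × List (List Char) × Option (List Char) :=
  (s.1, s.2.1, if s.2.2 = [] then none else some s.2.2)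

lemma pvFoldA_plain (c : List Char) (h : pvPlain c) :
    ∀ (i : Int) (res : List (List Char)) (line : List Char),
      List.foldl pvStepA (i, res, line) c =
        (i, res, if c = [] then line else (if line = [] then pvTabs i else line) ++ c) := by
  induction c with
  | nil => intro i res line; simp
  | cons x xs ih =>
    intro i res line
    have hx := h x (by simp)
    have hxs : pvPlain xs := fun y hy => h y (by simp [hy])
    simp only [List.foldl_cons]
    have hx1 := hx.1
    simp only [not_or] at hx1
    have hstep : pvStepA (i, res, line) x
        = (i, res, (if line = [] then pvTabs i else line) ++ [x]) := by
      simp [pvStepA, hx1.1, hx1.2.1, hx1.2.2.1, hx1.2.2.2, hx.2]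
    rw [hstep, ih hxs]
    have hne : (if line = [] then pvTabs i else line) ++ [x] ≠ [] := by
      simp
    cases xs with
    | nil => simp
    | cons y ys => simp [hne, List.append_assoc]

-- plain, nonempty token: one B step = A's char fold (through pvConv)
lemma pvStepB_plain (c : List Char) (h : pvPlain c) (hne : c ≠ [])
    (s : Int × List (List Char) × List Char) :
    pvStepB (pvConv s) c = pvConv (List.foldl pvStepA s c) := by
  obtain ⟨i, res, line⟩ := s
  have hnb : ¬(c = ['{'] ∨ c = ['['] ∨ c = ['}'] ∨ c = [']']) := by
    rintro (rfl | rfl | rfl | rfl)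
    · exact (h '{' (by simp)).1 (Or.inl rfl)
    · exact (h '[' (by simp)).1 (Or.inr (Or.inl rfl))
    · exact (h '}' (by simp)).1 (Or.inr (Or.inr (Or.inr rfl)))
    · exact (h ']' (by simp)).1 (Or.inr (Or.inr (Or.inl rfl)))
  have hnc : ¬ c.getLast? = some ',' := by
    intro hc
    exact (h ',' (List.mem_of_getLast? hc)).2 rfl
  rw [pvFoldA_plain c h]
  simp only [not_or] at hnb
  by_cases hl : line = [] <;>
    simp [pvStepB, pvConv, hnb.1, hnb.2.1, hnb.2.2.1, hnb.2.2.2, hnc, hne, hl]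

-- comma-terminated token: one B step = A's char fold (through pvConv)
lemma pvStepB_comma (c : List Char) (h : pvPlain c)
    (s : Int × List (List Char) × List Char) :
    pvStepB (pvConv s) (c ++ [',']) = pvConv (List.foldl pvStepA s (c ++ [','])) := by
  obtain ⟨i, res, line⟩ := s
  have hnb : ¬((c ++ [',']) = ['{'] ∨ (c ++ [',']) = ['['] ∨ (c ++ [',']) = ['}'] ∨ (c ++ [',']) = [']']) := by
    rintro (hc | hc | hc | hc) <;>
      · cases c with
        | nil => simp_all
        | cons y ys => cases ys <;> simp_all
  have hlast : (c ++ [',']).getLast? = some ',' := by simp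
  rw [List.foldl_append, pvFoldA_plain c h]
  simp only [not_or] at hnb
  simp only [pvStepB, hnb.1, hnb.2.1, hnb.2.2.1, hnb.2.2.2, hlast]
  cases c with
  | nil =>
    by_cases hl : line = [] <;> simp [pvStepA, pvConv, hl]
  | cons y ys =>
    have hne : (if line = [] then pvTabs i else line) ++ (y :: ys) ≠ [] := by simp
    by_cases hl : line = [] <;> simp [pvStepA, pvConv, hl, List.append_assoc]

-- main invariant: emitting the tokens of cs (with pending run cur) = A's fold over cur ++ cs
lemma pvTok_fold (cs : List Char) :
    ∀ (cur : List Char) (s : Int × List (List Char) × List Char), pvPlain cur →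
      List.foldl pvStepB (pvConv s) (pvTok cs cur) = pvConv (List.foldl pvStepA s (cur ++ cs)) := by
  induction cs with
  | nil =>
    intro cur s hcur
    by_cases h : cur = []
    · simp [pvTok, h]
    · simp only [pvTok, if_neg h, List.append_nil, List.foldl_cons, List.foldl_nil]
      exact pvStepB_plain cur hcur h s
  | cons x xs ih =>
    intro cur s hcur
    have hplain0 : pvPlain [] := by intro y hy; simp at hy
    by_cases hb : x = '{' ∨ x = '[' ∨ x = ']' ∨ x = '}'
    · have hbx : ∀ s', pvStepB (pvConv s') [x] = pvConv (pvStepA s' x) := by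
        intro s'; obtain ⟨i, res, line⟩ := s'
        rcases hb with rfl | rfl | rfl | rfl <;>
          by_cases hl : line = [] <;> simp [pvStepB, pvStepA, pvConv, hl]
      by_cases h : cur = []
      · subst h
        simp only [pvTok, hb, if_true, List.nil_append, List.foldl_cons]
        rw [hbx, ih [] _ hplain0, List.nil_append]
      · simp only [pvTok, hb, if_true, if_neg h, List.cons_append, List.foldl_cons]
        rw [pvStepB_plain cur hcur h s]
        simp only [List.nil_append, List.foldl_cons]
        rw [hbx, ih [] _ hplain0, List.nil_append, List.foldl_append, List.foldl_cons]
    · by_cases hc : x = ','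
      · subst hc
        simp only [pvTok, if_neg hb, if_true, List.foldl_cons]
        rw [pvStepB_comma cur hcur s, ih [] _ hplain0, List.nil_append, ← List.foldl_append]
        simp
      · have hcur' : pvPlain (cur ++ [x]) := by
          intro y hy
          rcases List.mem_append.mp hy with hy | hy
          · exact hcur y hy
          · simp at hy; subst hy; exact ⟨hb, hc⟩
        simp only [pvTok, if_neg hb, if_neg hc]
        rw [ih (cur ++ [x]) s hcur']
        simp

-- ===== VERDICT (by name: the statement is the Claim_ definition above) =====
theorem prettyJSON_spec : Claim_equal_prettyJSON := by
  intro A _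
  show prettyJSON A = prettyJSON_alt A
  unfold prettyJSON prettyJSON_alt
  have h0 : (0, ([] : List (List Char)), (none : Option (List Char)))
      = pvConv (0, [], []) := rfl
  rw [h0, pvTok_fold A.toList [] (0, [], []) (by intro y hy; simp at hy), List.nil_append]
  obtain ⟨i, res, line⟩ := A.toList.foldl pvStepA (0, [], [])
  by_cases hl : line = [] <;> simp [pvConv, hl]
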